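-- pv_equiv track=rewrite | github.com/mmhamza1234/procurement | procurment-tool/modules/order_tracker.py | categorize_suppliers
-- ===== SOURCE A (Python) =====
-- from typing import Dict, List, Optional
--
-- def categorize_suppliers(emails: List[Dict]) -> str:
--     """Categorize suppliers by country and materials."""
--     categories = {}
--
--     for email in emails:
--         country = email.get('country', 'Unknown')
--         materials = email.get('materials', '')
--
--         if country not in categories:
--             categories[country] = {'count': 0, 'materials': set()}
--         categories[country]['count'] += 1
--
--         # Extract material keywords from supplier's specializations
--         if materials:
--             material_keywords = ['piping', 'pipes', 'valves', 'flanges', 'fittings', 'bolts', 'gaskets', 'finned tubes']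
--             for keyword in material_keywords:
--                 if keyword.lower() in materials.lower():
--                     categories[country]['materials'].add(keyword)
--
--     # Create detailed category strings
--     category_strings = []
--     for country, data in categories.items():
--         count = data['count']
--         materials = list(data['materials'])
--
--         if country.lower() == 'china':
--             country_name = "Chinese"
--         elif country.lower() == 'uae':
--             country_name = "Emirati"
--         else:
--             country_name = country
--
--         if materials:
--             material_text = ', '.join(sorted(materials))
--             category_strings.append(f"{country_name}: {count} suppliers ({material_text})")
--         else:
--             category_strings.append(f"{country_name}: {count} suppliers")
--
--     return '; '.join(category_strings)
-- ===== SOURCE B (Python) =====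
-- KEYWORDS = ['piping', 'pipes', 'valves', 'flanges', 'fittings', 'bolts', 'gaskets', 'finned tubes']
--
-- def categorize_suppliers(emails):
--     """Categorize suppliers by country and materials (group first, then aggregate per group)."""
--     groups = {}
--     for email in emails:
--         groups.setdefault(email.get('country', 'Unknown'), []).append(email.get('materials', ''))
--
--     parts = []
--     for country, mats in groups.items():
--         found = sorted(kw for kw in KEYWORDS if any(kw in m.lower() for m in mats))
--         low = country.lower()
--         name = 'Chinese' if low == 'china' else 'Emirati' if low == 'uae' else country
--         part = f"{name}: {len(mats)} suppliers"
--         if found: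
--             part += f" ({', '.join(found)})"
--         parts.append(part)
--     return '; '.join(parts)
-- ===== Notes on version B (the rewrite author's own statement) =====
-- stated objective: alternative
-- what changed: A accumulates count and a keyword set per country while scanning the emails; B first groups the raw materials strings by country (setdefault/append, first-seen order) and only then, per group, derives the count from the group length and the keyword list by one membership scan over the group.
import Mathlib
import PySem

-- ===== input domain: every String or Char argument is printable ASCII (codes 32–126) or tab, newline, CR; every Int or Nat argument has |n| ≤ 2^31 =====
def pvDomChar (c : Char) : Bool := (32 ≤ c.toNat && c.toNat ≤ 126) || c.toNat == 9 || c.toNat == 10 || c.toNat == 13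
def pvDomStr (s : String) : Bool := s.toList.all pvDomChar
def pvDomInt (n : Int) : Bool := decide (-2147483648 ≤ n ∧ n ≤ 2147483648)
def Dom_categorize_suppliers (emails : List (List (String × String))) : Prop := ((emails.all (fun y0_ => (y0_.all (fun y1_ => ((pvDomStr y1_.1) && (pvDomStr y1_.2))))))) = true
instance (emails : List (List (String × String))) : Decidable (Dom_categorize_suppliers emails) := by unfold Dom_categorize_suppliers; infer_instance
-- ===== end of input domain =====

-- B groups the raw materials strings by country first and only then aggregates each group
-- (count = group length, keywords by one scan of the keyword list per group); same output as A.

-- shared literal data / accessors (both Pythons call email.get with the same keys)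
def material_keywords : List String :=
  ["piping", "pipes", "valves", "flanges", "fittings", "bolts", "gaskets", "finned tubes"]

def pvKey (email : List (String × String)) : String :=
  (PySem.Dict.mk email).getD "country" "Unknown"

def pvMat (email : List (String × String)) : String :=
  (PySem.Dict.mk email).getD "materials" ""

-- ===== PORT A =====

-- the keyword-extraction inner loop of A ('if materials: for keyword in …: …add(keyword)')
def pvA_addKeywords (s : PySem.Set String) (materials : String) : PySem.Set String :=
  if materials ≠ "" then
    material_keywords.foldl
      (fun s keyword =>
        if PySem.Str.isIn (PySem.Str.lower keyword) (PySem.Str.lower materials) then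
          PySem.Set.add s keyword
        else s) s
  else s

-- one iteration of A's first loop (the dict entry is mutated in place in Python;
-- ported as re-inserting the updated (count, set) pair at the same key)
def pvA_step (categories : PySem.Dict String (Int × PySem.Set String))
    (email : List (String × String)) : PySem.Dict String (Int × PySem.Set String) :=
  let country := pvKey email
  let materials := pvMat email
  let categories :=
    if categories.contains country then categories
    else categories.insert country (0, PySem.Set.empty)
  let data := categories.getD country (0, PySem.Set.empty)
  categories.insert country (data.1 + 1, pvA_addKeywords data.2 materials)

-- one iteration of A's second loop (the f-string formatting)
def pvA_format (country : String) (data : Int × PySem.Set String) : String :=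
  let count := data.1
  let materials := data.2
  let country_name :=
    if PySem.Str.lower country = "china" then "Chinese"
    else if PySem.Str.lower country = "uae" then "Emirati"
    else country
  if materials ≠ [] then
    country_name ++ ": " ++ PySem.Int.toStr count ++ " suppliers (" ++
      PySem.Str.join ", " (PySem.List.sorted materials (fun x => x)) ++ ")"
  else
    country_name ++ ": " ++ PySem.Int.toStr count ++ " suppliers"

def categorize_suppliers (emails : List (List (String × String))) : String :=
  let categories := emails.foldl pvA_step PySem.Dict.empty
  let category_strings :=
    categories.items.foldl (fun acc p => acc ++ [pvA_format p.1 p.2]) []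
  PySem.Str.join "; " category_strings

-- ===== PORT B =====

def categorize_suppliers_alt (emails : List (List (String × String))) : String :=
  let groups : PySem.Dict String (List String) :=
    emails.foldl
      (fun groups email => groups.modify (pvKey email) [] (fun g => g ++ [pvMat email]))
      PySem.Dict.empty
  let parts :=
    groups.items.map (fun p =>
      let found :=
        PySem.List.sorted
          (material_keywords.filter
            (fun kw => p.2.any (fun m => PySem.Str.isIn kw (PySem.Str.lower m))))
          (fun x => x)
      let low := PySem.Str.lower p.1
      let name := if low = "china" then "Chinese" else if low = "uae" then "Emirati" else p.1
      let part := name ++ ": " ++ PySem.Int.toStr (p.2.length : Int) ++ " suppliers"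
      if found ≠ [] then part ++ " (" ++ PySem.Str.join ", " found ++ ")" else part)
  PySem.Str.join "; " parts

-- ===== PRECONDITION & SPEC =====
def Spec_categorize_suppliers (emails : List (List (String × String))) (out : String) : Prop := out = categorize_suppliers_alt emails
instance (emails : List (List (String × String))) (out : String) : Decidable (Spec_categorize_suppliers emails out) := by unfold Spec_categorize_suppliers; infer_instance

-- ===== CLAIM (what is proved, stated in full; the proofs are below) =====
def Claim_equal_categorize_suppliers : Prop := ∀ (emails : List (List (String × String))), Dom_categorize_suppliers emails → Spec_categorize_suppliers emails (categorize_suppliers emails)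

-- ===== LEMMAS AND PROOFS =====

-- keys of A's dict after the first loop: countries in first-seen order
theorem pvA_step_keys (d : PySem.Dict String (Int × PySem.Set String))
    (e : List (String × String)) :
    (pvA_step d e).keys = PySem.Set.add d.keys (pvKey e) := by
  unfold pvA_step
  by_cases h : d.contains (pvKey e) = true
  · have hm : PySem.Set.contains d.keys (pvKey e) = true :=
      (PySem.Set.contains_iff _ _).mpr ((PySem.Dict.contains_iff_mem_keys d _).mp h)
    simp only [h, if_true]
    rw [PySem.Dict.keys_insert_of_contains _ _ h]
    simp only [PySem.Set.add, hm, if_true]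
  · have h' : d.contains (pvKey e) = false := by simpa using h
    have hm : PySem.Set.contains d.keys (pvKey e) = false := by
      rw [← Bool.not_eq_true, PySem.Set.contains_iff]
      intro hmem
      exact absurd ((PySem.Dict.contains_iff_mem_keys d _).mpr hmem) (by simp [h'])
    simp only [h', Bool.false_eq_true, if_false]
    rw [PySem.Dict.keys_insert_of_contains _ _ (PySem.Dict.contains_insert_self d _ _),
      PySem.Dict.keys_insert_of_not_contains d _ h']
    simp only [PySem.Set.add, hm, Bool.false_eq_true, if_false]

theorem pvA_keys (emails : List (List (String × String)))
    (d : PySem.Dict String (Int × PySem.Set String)) :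
    (emails.foldl pvA_step d).keys = PySem.Set.update d.keys (emails.map pvKey) := by
  induction emails generalizing d with
  | nil => simp [PySem.Set.update]
  | cons e rest ih =>
      simp only [List.foldl_cons, List.map_cons]
      rw [ih, pvA_step_keys]
      rfl

theorem pvA_step_getD (d : PySem.Dict String (Int × PySem.Set String))
    (e : List (String × String)) (c : String) :
    (pvA_step d e).getD c (0, PySem.Set.empty) =
      if c = pvKey e then
        ((d.getD (pvKey e) (0, PySem.Set.empty)).1 + 1,
          pvA_addKeywords (d.getD (pvKey e) (0, PySem.Set.empty)).2 (pvMat e))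
      else d.getD c (0, PySem.Set.empty) := by
  unfold pvA_step
  by_cases h : d.contains (pvKey e) = true
  · simp only [h, if_true]
    rw [PySem.Dict.getD_insert]
  · have h' : d.contains (pvKey e) = false := by simpa using h
    simp only [h', Bool.false_eq_true, if_false]
    simp only [PySem.Dict.getD_insert, PySem.Dict.getD_of_not_contains d _ h']
    split_ifs <;> simp_all

-- the per-country entry of A's dict, for EVERY country string c
theorem pvA_getD (emails : List (List (String × String)))
    (d : PySem.Dict String (Int × PySem.Set String)) (c : String) :
    (emails.foldl pvA_step d).getD c (0, PySem.Set.empty) =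
      (((d.getD c (0, PySem.Set.empty)).1 +
          ((emails.filter (fun e => pvKey e == c)).map pvMat).length : Int),
        ((emails.filter (fun e => pvKey e == c)).map pvMat).foldl pvA_addKeywords
          (d.getD c (0, PySem.Set.empty)).2) := by
  induction emails generalizing d with
  | nil => simp
  | cons e rest ih =>
      simp only [List.foldl_cons, List.filter_cons]
      rw [ih, pvA_step_getD]
      by_cases hc : c = pvKey e
      · subst hc
        simp only [beq_self_eq_true, if_true, List.map_cons, List.foldl_cons,
          List.length_cons, Prod.mk.injEq]
        exact ⟨by push_cast; omega, trivial⟩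
      · have hb : (pvKey e == c) = false := by
          rw [beq_eq_false_iff_ne]; exact fun h => hc h.symm
        simp only [hb, Bool.false_eq_true, if_false, if_neg hc]

-- membership in A's accumulated keyword set
theorem pv_mem_kwfold (ks : List String) (p : String → Bool) (s : PySem.Set String)
    (x : String) :
    x ∈ ks.foldl (fun s k => if p k then PySem.Set.add s k else s) s ↔
      x ∈ s ∨ (x ∈ ks ∧ p x = true) := by
  induction ks generalizing s with
  | nil => simp
  | cons k ks ih =>
      simp only [List.foldl_cons, List.mem_cons]
      rw [ih]
      by_cases h : p k = true
      · rw [if_pos h]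
        simp only [PySem.Set.mem_add]
        constructor
        · rintro ((hx | rfl) | ⟨hm, hp⟩)
          · exact Or.inl hx
          · exact Or.inr ⟨Or.inl rfl, h⟩
          · exact Or.inr ⟨Or.inr hm, hp⟩
        · rintro (hx | ⟨rfl | hm, hp⟩)
          · exact Or.inl (Or.inl hx)
          · exact Or.inl (Or.inr rfl)
          · exact Or.inr ⟨hm, hp⟩
      · rw [if_neg h]
        constructor
        · rintro (hx | ⟨hm, hp⟩)
          · exact Or.inl hx
          · exact Or.inr ⟨Or.inr hm, hp⟩
        · rintro (hx | ⟨rfl | hm, hp⟩)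
          · exact Or.inl hx
          · exact absurd hp h
          · exact Or.inr ⟨hm, hp⟩

theorem pvA_mem_addKeywords (s : PySem.Set String) (m x : String) :
    x ∈ pvA_addKeywords s m ↔
      x ∈ s ∨ (m ≠ "" ∧ x ∈ material_keywords ∧
        PySem.Str.isIn (PySem.Str.lower x) (PySem.Str.lower m) = true) := by
  unfold pvA_addKeywords
  by_cases h : m = ""
  · simp [h]
  · rw [if_pos h, pv_mem_kwfold]
    simp only [h, ne_eq, not_false_eq_true, true_and]

theorem pvA_mem_addKeywords_foldl (ms : List String) (s : PySem.Set String) (x : String) :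
    x ∈ ms.foldl pvA_addKeywords s ↔
      x ∈ s ∨ (x ∈ material_keywords ∧
        ∃ m ∈ ms, m ≠ "" ∧
          PySem.Str.isIn (PySem.Str.lower x) (PySem.Str.lower m) = true) := by
  induction ms generalizing s with
  | nil => simp
  | cons m ms ih =>
      simp only [List.foldl_cons, List.exists_mem_cons_iff]
      rw [ih, pvA_mem_addKeywords]
      constructor
      · rintro ((hx | ⟨hm0, hk, hp⟩) | ⟨hk, hrest⟩)
        · exact Or.inl hx
        · exact Or.inr ⟨hk, Or.inl ⟨hm0, hp⟩⟩
        · exact Or.inr ⟨hk, Or.inr hrest⟩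
      · rintro (hx | ⟨hk, ⟨hm0, hp⟩ | hrest⟩)
        · exact Or.inl (Or.inl hx)
        · exact Or.inl (Or.inr ⟨hm0, hk, hp⟩)
        · exact Or.inr ⟨hk, hrest⟩

theorem pv_nodup_kwfold (ks : List String) (p : String → Bool) (s : PySem.Set String)
    (h : s.Nodup) :
    (ks.foldl (fun s k => if p k then PySem.Set.add s k else s) s).Nodup := by
  induction ks generalizing s with
  | nil => exact h
  | cons k ks ih =>
      simp only [List.foldl_cons]
      apply ih
      by_cases hp : p k = true
      · rw [if_pos hp]; exact PySem.Set.nodup_add s k h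
      · rwa [if_neg hp]

theorem pvA_nodup_addKeywords_foldl (ms : List String) (s : PySem.Set String)
    (h : s.Nodup) : (ms.foldl pvA_addKeywords s).Nodup := by
  induction ms generalizing s with
  | nil => exact h
  | cons m ms ih =>
      simp only [List.foldl_cons]
      apply ih
      unfold pvA_addKeywords
      by_cases hm : m = ""
      · simpa [hm] using h
      · rw [if_pos hm]; exact pv_nodup_kwfold _ _ s h

-- the two per-group keyword conditions agree (keywords are lowercase and nonempty)
theorem pv_cond_eq (x : String) (hx : x ∈ material_keywords) (m : String) :
    (m ≠ "" ∧ PySem.Str.isIn (PySem.Str.lower x) (PySem.Str.lower m) = true) ↔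
      PySem.Str.isIn x (PySem.Str.lower m) = true := by
  have hl : PySem.Str.lower x = x := by fin_cases hx <;> decide
  have hempty : PySem.Str.isIn x (PySem.Str.lower "") = false := by
    fin_cases hx <;> decide
  constructor
  · rintro ⟨hm, hi⟩; rwa [hl] at hi
  · intro hi
    refine ⟨?_, by rwa [hl]⟩
    rintro rfl
    rw [hempty] at hi
    cases hi

-- the per-country lemma: A's formatted entry = B's formatted entry
theorem pv_per_country (c : String) (ms : List String) :
    pvA_format c ((0 : Int) + (ms.length : Int), ms.foldl pvA_addKeywords PySem.Set.empty) =
      (let found :=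
        PySem.List.sorted
          (material_keywords.filter
            (fun kw => ms.any (fun m => PySem.Str.isIn kw (PySem.Str.lower m))))
          (fun x => x)
      let low := PySem.Str.lower c
      let name := if low = "china" then "Chinese" else if low = "uae" then "Emirati" else c
      let part := name ++ ": " ++ PySem.Int.toStr (ms.length : Int) ++ " suppliers"
      if found ≠ [] then part ++ " (" ++ PySem.Str.join ", " found ++ ")" else part) := by
  have hperm : (ms.foldl pvA_addKeywords PySem.Set.empty).Perm
      (material_keywords.filter
        (fun kw => ms.any (fun m => PySem.Str.isIn kw (PySem.Str.lower m)))) := by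
    rw [List.perm_ext_iff_of_nodup
      (pvA_nodup_addKeywords_foldl ms PySem.Set.empty List.nodup_nil)
      (List.Nodup.filter _ (by decide : material_keywords.Nodup))]
    intro x
    rw [pvA_mem_addKeywords_foldl, List.mem_filter, List.any_eq_true]
    constructor
    · rintro (hx | ⟨hk, m, hm, hcond⟩)
      · cases hx
      · exact ⟨hk, m, hm, (pv_cond_eq x hk m).mp hcond⟩
    · rintro ⟨hk, m, hm, hi⟩
      exact Or.inr ⟨hk, m, hm, (pv_cond_eq x hk m).mpr hi⟩
  have hsort : PySem.List.sorted (ms.foldl pvA_addKeywords PySem.Set.empty) (fun x => x) =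
      PySem.List.sorted
        (material_keywords.filter
          (fun kw => ms.any (fun m => PySem.Str.isIn kw (PySem.Str.lower m))))
        (fun x => x) :=
    PySem.List.sorted_eq_sorted_of_perm _ _ _ (fun _ _ h => h) hperm
  have hcount : ((0 : Int) + (ms.length : Int)) = (ms.length : Int) := by omega
  simp only [pvA_format, hcount]
  by_cases hf : PySem.List.sorted
      (material_keywords.filter
        (fun kw => ms.any (fun m => PySem.Str.isIn kw (PySem.Str.lower m))))
      (fun x => x) = []
  · have hset : ms.foldl pvA_addKeywords PySem.Set.empty = [] := by
      have := hsort.trans hf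
      rwa [PySem.List.sorted_eq_nil_iff] at this
    simp only [hset, hf, ne_eq, not_true_eq_false, if_false]
  · have hset : ms.foldl pvA_addKeywords PySem.Set.empty ≠ [] := by
      intro h0
      exact hf (by rw [← hsort, h0]; rfl)
    have hlit : ∀ z : String, " suppliers" ++ (" (" ++ z) = " suppliers (" ++ z := by
      intro z; rw [← String.append_assoc]; rfl
    simp only [hf, hset, ne_eq, not_false_eq_true, if_true, hsort, String.append_assoc, hlit]

-- ===== VERDICT (by name: the statement is the Claim_ definition above) =====
theorem categorize_suppliers_spec : Claim_equal_categorize_suppliers := by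
  intro emails _
  unfold Spec_categorize_suppliers
  simp only [categorize_suppliers, categorize_suppliers_alt]
  have hB : emails.foldl
        (fun groups email => groups.modify (pvKey email) [] (fun g => g ++ [pvMat email]))
        PySem.Dict.empty =
      (emails.map (fun e => (pvKey e, pvMat e))).foldl
        (fun d p => d.modify p.1 [] (fun g => g ++ [p.2])) PySem.Dict.empty := by
    rw [List.foldl_map]
  have hgB : ∀ c, (emails.foldl
        (fun groups email => groups.modify (pvKey email) [] (fun g => g ++ [pvMat email]))
        PySem.Dict.empty).getD c [] =
      (emails.filter (fun e => pvKey e == c)).map pvMat := by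
    intro c
    rw [hB, PySem.Dict.getD_foldl_modify_append]
    simp [List.filter_map, List.map_map, Function.comp_def]
  have hKA : (emails.foldl pvA_step PySem.Dict.empty).keys =
      PySem.Set.ofList (emails.map pvKey) := by
    rw [pvA_keys]
    simp [PySem.Set.update_nil_left]
  have hKB : (emails.foldl
        (fun groups email => groups.modify (pvKey email) [] (fun g => g ++ [pvMat email]))
        PySem.Dict.empty).keys = PySem.Set.ofList (emails.map pvKey) := by
    rw [hB, PySem.Dict.keys_foldl_modify_key]
    simp [PySem.Set.update_nil_left, List.map_map, Function.comp_def]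
  rw [PySem.List.foldl_append_singleton_eq_map, List.nil_append,
    PySem.Dict.items_eq_map_keys _ (by rw [hKA]; exact PySem.Set.nodup_ofList _)
      ((0 : Int), PySem.Set.empty),
    PySem.Dict.items_eq_map_keys _ (by rw [hKB]; exact PySem.Set.nodup_ofList _)
      ([] : List String),
    List.map_map, List.map_map, hKA, hKB]
  refine congrArg _ (List.map_congr_left fun c _ => ?_)
  simp only [Function.comp_apply]
  rw [pvA_getD emails PySem.Dict.empty c, hgB c]
  simp only [PySem.Dict.getD_empty]
  exact pv_per_country c _
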